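-- pv_equiv track=rewrite | github.com/Animesh66/DS_Algo | leetcode_solutions.py | find_divisible_pairs
-- ===== SOURCE A (Python) =====
-- from collections import defaultdict
--
-- def find_divisible_pairs(input_list: list[int], k: int) -> bool:
--     # Create a dictionary to store frequencies of remainders
--     remainder_count = defaultdict(int)
--
--     # Count frequencies of the remainder when elements are divided by k
--     for num in input_list:
--         remainder = num % k
--         remainder_count[remainder] += 1
--
--     # Iterate through the unique remainders
--     for rem in remainder_count:
--         # Special case: if the remainder is 0, the count of these numbers must be even
--         if rem == 0:
--             if remainder_count[rem] % 2 != 0: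
--                 return False
--         # Special case: if remainder is exactly half of k (only possible when k is even),
--         # we also need an even number of such elements
--         elif rem * 2 == k:
--             if remainder_count[rem] % 2 != 0:
--                 return False
--         # For all other cases, check if remainder_count[rem] == remainder_count[k - rem]
--         else:
--             if remainder_count[rem] != remainder_count[k - rem]:
--                 return False
--
--     return True
-- ===== SOURCE B (Python) =====
-- def find_divisible_pairs(input_list: list[int], k: int) -> bool:
--     # Single-pass online matching: greedily pair each element with a pending
--     # complementary remainder; succeed iff nothing is left unmatched.
--     pending = {}
--     for num in input_list:
--         r = num % k
--         c = (k - r) % k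
--         if pending.get(c, 0) > 0:
--             pending[c] -= 1
--         else:
--             pending[r] = pending.get(r, 0) + 1
--     return all(v == 0 for v in pending.values())
-- ===== Notes on version B (the rewrite author's own statement) =====
-- stated objective: alternative
-- what changed: Replaces A's two-phase structure (count all remainder frequencies, then per-remainder parity/complement comparisons) with a single-pass online greedy matching: each element either cancels a pending complementary remainder or becomes pending itself, and the answer is whether anything is left unmatched; Pre_ excludes only nonempty lists with k==0, where both A and B raise ZeroDivisionError.
import Mathlib
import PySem

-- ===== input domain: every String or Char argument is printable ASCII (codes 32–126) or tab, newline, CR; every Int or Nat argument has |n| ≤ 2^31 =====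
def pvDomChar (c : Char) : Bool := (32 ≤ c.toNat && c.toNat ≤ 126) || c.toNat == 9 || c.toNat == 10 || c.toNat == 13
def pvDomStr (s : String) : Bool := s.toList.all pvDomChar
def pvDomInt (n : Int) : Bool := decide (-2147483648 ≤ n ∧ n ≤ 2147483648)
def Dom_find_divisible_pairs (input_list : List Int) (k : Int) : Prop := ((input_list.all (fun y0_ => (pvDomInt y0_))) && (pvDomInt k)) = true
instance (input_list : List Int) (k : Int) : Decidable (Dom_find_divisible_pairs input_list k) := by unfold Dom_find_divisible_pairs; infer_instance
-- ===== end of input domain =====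

-- B replaces A's two-phase count-then-check with a single-pass online greedy matching (each element
-- cancels a pending complementary remainder or becomes pending); equivalence of the RETURN values is
-- proved on Pre_, which excludes only nonempty lists with k = 0, where both raise ZeroDivisionError.

-- ===== PORT A =====
-- the second loop of A: iterate over the dict's keys, with early return False
def pvCheckA (rc : PySem.Dict Int Int) (k : Int) : List Int → Bool
  | [] => true
  | rem :: rest =>
    if rem == 0 then
      if PySem.Int.mod (rc.getD rem 0) 2 != 0 then false else pvCheckA rc k rest
    else if rem * 2 == k then
      if PySem.Int.mod (rc.getD rem 0) 2 != 0 then false else pvCheckA rc k rest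
    else
      if rc.getD rem 0 != rc.getD (k - rem) 0 then false else pvCheckA rc k rest

def find_divisible_pairs (input_list : List Int) (k : Int) : Bool :=
  let remainder_count :=
    input_list.foldl (fun d num => d.modify (PySem.Int.mod num k) 0 (· + 1)) PySem.Dict.empty
  pvCheckA remainder_count k remainder_count.keys

-- ===== PORT B =====
def find_divisible_pairs_alt (input_list : List Int) (k : Int) : Bool :=
  let pending := input_list.foldl (fun d num =>
    let r := PySem.Int.mod num k
    let c := PySem.Int.mod (k - r) k
    if d.getD c 0 > 0 then d.modify c 0 (· - 1) else d.modify r 0 (· + 1))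
    (PySem.Dict.empty : PySem.Dict Int Int)
  pending.values.all (fun v => v == 0)

-- ===== PRECONDITION & SPEC =====
-- Pre_ excludes exactly the inputs on which A raises ZeroDivisionError (num % 0 in a nonempty list).
def Pre_find_divisible_pairs (input_list : List Int) (k : Int) : Prop :=
  input_list = [] ∨ k ≠ 0
instance (input_list : List Int) (k : Int) : Decidable (Pre_find_divisible_pairs input_list k) := by
  unfold Pre_find_divisible_pairs; infer_instance

def pvWitness_find_divisible_pairs : List Int × Int := ([1, 5, 2, 4], 3)

def Spec_find_divisible_pairs (input_list : List Int) (k : Int) (out : Bool) : Prop := out = find_divisible_pairs_alt input_list k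
instance (input_list : List Int) (k : Int) (out : Bool) : Decidable (Spec_find_divisible_pairs input_list k out) := by unfold Spec_find_divisible_pairs; infer_instance

-- ===== CLAIM (what is proved, stated in full; the proofs are below) =====
def Claim_equal_find_divisible_pairs : Prop := ∀ (input_list : List Int) (k : Int), Dom_find_divisible_pairs input_list k → Pre_find_divisible_pairs input_list k → Spec_find_divisible_pairs input_list k (find_divisible_pairs input_list k)

-- ===== LEMMAS AND PROOFS =====

-- the complement of a remainder, (k - x) % k
def pvG (k x : Int) : Int := PySem.Int.mod (k - x) k

-- the pending (unmatched) count of remainder x after B has processed a remainder list l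
def pvPend (k : Int) (l : List Int) (x : Int) : Int :=
  if pvG k x = x then ((l.count x % 2 : Nat) : Int)
  else max ((l.count x : Int) - (l.count (pvG k x) : Int)) 0

-- B's loop body, as a function of the element's remainder
def pvStep (k : Int) (d : PySem.Dict Int Int) (r : Int) : PySem.Dict Int Int :=
  if d.getD (PySem.Int.mod (k - r) k) 0 > 0 then d.modify (PySem.Int.mod (k - r) k) 0 (· - 1)
  else d.modify r 0 (· + 1)

-- congruence characterisation of Python's floor mod, every k ≠ 0
theorem pvModCong (k a b : Int) (hk : k ≠ 0) :
    PySem.Int.mod a k = PySem.Int.mod b k ↔ k ∣ a - b := by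
  rcases lt_or_gt_of_ne hk with hneg | hpos
  · have ea := PySem.Int.mod_neg_neg a k
    have eb := PySem.Int.mod_neg_neg b k
    have h1 : PySem.Int.mod a k = PySem.Int.mod b k ↔
        PySem.Int.mod (-a) (-k) = PySem.Int.mod (-b) (-k) := by omega
    rw [h1, PySem.Int.mod_eq_emod_of_pos (by omega : (0:Int) < -k),
        PySem.Int.mod_eq_emod_of_pos (by omega : (0:Int) < -k),
        Int.emod_eq_emod_iff_emod_sub_eq_zero, PySem.Int.emod_eq_zero_iff_dvd]
    constructor
    · rintro ⟨t, ht⟩; exact ⟨t, by linarith⟩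
    · rintro ⟨t, ht⟩; exact ⟨t, by linarith⟩
  · rw [PySem.Int.mod_eq_emod_of_pos hpos, PySem.Int.mod_eq_emod_of_pos hpos,
        Int.emod_eq_emod_iff_emod_sub_eq_zero, PySem.Int.emod_eq_zero_iff_dvd]

theorem pvDvdSubMod (k a : Int) : k ∣ a - PySem.Int.mod a k :=
  ⟨PySem.Int.floordiv a k, by have := PySem.Int.floordiv_mul_add_mod a k; linarith⟩

theorem pvModMod (k a : Int) (hk : k ≠ 0) :
    PySem.Int.mod (PySem.Int.mod a k) k = PySem.Int.mod a k := by
  have hd : k ∣ PySem.Int.mod a k - a := by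
    have h2 : PySem.Int.mod a k - a = -(a - PySem.Int.mod a k) := by ring
    rw [h2]
    exact dvd_neg.mpr (pvDvdSubMod k a)
  exact (pvModCong k (PySem.Int.mod a k) a hk).mpr hd

-- a value already in the divisor-side range is its own remainder
theorem pvModSelf (k x : Int)
    (h : (0 < k ∧ 0 ≤ x ∧ x < k) ∨ (k < 0 ∧ k < x ∧ x ≤ 0)) :
    PySem.Int.mod x k = x := by
  rcases h with ⟨hk, h1, h2⟩ | ⟨hk, h1, h2⟩
  · rw [PySem.Int.mod_eq_emod_of_pos hk]
    exact Int.emod_eq_of_lt h1 h2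
  · have e := PySem.Int.mod_neg_neg (-x) (-k)
    simp only [neg_neg] at e
    rw [e, PySem.Int.mod_eq_emod_of_pos (by omega : (0:Int) < -k),
        Int.emod_eq_of_lt (by omega) (by omega)]
    ring

-- canonical remainders are bounded by k (on the divisor's side)
theorem pvCanonBounds (k x : Int) (h : PySem.Int.mod x k = x) :
    (0 < k → 0 ≤ x ∧ x < k) ∧ (k < 0 → k < x ∧ x ≤ 0) := by
  constructor
  · intro hpos
    exact ⟨h ▸ PySem.Int.mod_nonneg x hpos, h ▸ PySem.Int.mod_lt x hpos⟩
  · intro hneg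
    have := PySem.Int.mod_neg_bounds x hneg
    omega

-- on a canonical nonzero remainder the complement is plain subtraction
theorem pvGEq (k r : Int) (hk : k ≠ 0) (h : PySem.Int.mod r k = r) (h0 : r ≠ 0) :
    pvG k r = k - r := by
  unfold pvG
  apply pvModSelf
  have hb := pvCanonBounds k r h
  rcases lt_or_gt_of_ne hk with hneg | hpos
  · have := hb.2 hneg; right; omega
  · have := hb.1 hpos; left; omega

-- the complement map is an involution on canonical remainders
theorem pvGInvol (k x : Int) (hk : k ≠ 0) (h : PySem.Int.mod x k = x) :
    pvG k (pvG k x) = x := by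
  unfold pvG
  have hd : k ∣ (k - PySem.Int.mod (k - x) k) - x := by
    have h2 : (k - PySem.Int.mod (k - x) k) - x = (k - x) - PySem.Int.mod (k - x) k := by ring
    rw [h2]
    exact pvDvdSubMod k (k - x)
  calc PySem.Int.mod (k - PySem.Int.mod (k - x) k) k
      = PySem.Int.mod x k := (pvModCong k _ x hk).mpr hd
    _ = x := h

-- a canonical remainder is its own complement exactly in A's two "even count" branches
theorem pvGSelfIff (k r : Int) (hk : k ≠ 0) (h : PySem.Int.mod r k = r) :
    pvG k r = r ↔ (r = 0 ∨ r * 2 = k) := by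
  constructor
  · intro hg
    by_cases h0 : r = 0
    · exact Or.inl h0
    · right
      rw [pvGEq k r hk h h0] at hg
      omega
  · rintro (rfl | hr)
    · unfold pvG
      simp only [sub_zero]
      exact (PySem.Int.mod_eq_zero_iff_dvd k k).mpr dvd_rfl
    · unfold pvG
      have e : k - r = r := by omega
      rw [e, h]

-- a non-canonical value never occurs in a list of remainders
theorem pvCountNonCanon (k x : Int) (l : List Int) (hl : ∀ r ∈ l, PySem.Int.mod r k = r)
    (hx : PySem.Int.mod x k ≠ x) : l.count x = 0 := by
  rw [List.count_eq_zero]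
  intro hmem
  exact hx (hl x hmem)

-- counts in l ++ [r]
theorem pvCountApp (l : List Int) (x r : Int) :
    (l ++ [r]).count x = l.count x + if x = r then 1 else 0 := by
  simp [List.count_append, List.count_singleton']
  split <;> split <;> omega

-- modify preserves nodup keys
theorem pvNodupModify (d : PySem.Dict Int Int) (x d0 : Int) (f : Int → Int)
    (h : d.keys.Nodup) : (d.modify x d0 f).keys.Nodup := by
  rw [PySem.Dict.keys_modify]
  rcases hc : d.contains x with _ | _
  · rw [PySem.Dict.keys_insert_of_not_contains d _ hc]
    have hx : x ∉ d.keys := fun hm => by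
      rw [← PySem.Dict.contains_iff_mem_keys] at hm
      simp [hc] at hm
    exact List.Nodup.append h (List.nodup_singleton x)
      (List.disjoint_singleton.mpr hx)
  · rw [PySem.Dict.keys_insert_of_contains d _ hc]
    exact h

-- the INVARIANT of B's loop: pointwise pending counts, plus nodup keys
theorem pvInv (k : Int) (hk : k ≠ 0) (l : List Int) (hl : ∀ r ∈ l, PySem.Int.mod r k = r) :
    (∀ x, (l.foldl (pvStep k) PySem.Dict.empty).getD x 0 = pvPend k l x)
    ∧ (l.foldl (pvStep k) PySem.Dict.empty).keys.Nodup := by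
  induction l using List.reverseRecOn with
  | nil =>
    refine ⟨fun x => ?_, by simp [PySem.Dict.keys_empty]⟩
    simp only [List.foldl_nil, PySem.Dict.getD_empty, pvPend, List.count_nil]
    split <;> simp
  | append_singleton l r ih =>
    have hl' : ∀ r' ∈ l, PySem.Int.mod r' k = r' := fun r' hm => hl r' (by simp [hm])
    have hr : PySem.Int.mod r k = r := hl r (by simp)
    obtain ⟨ihp, ihn⟩ := ih hl'
    rw [List.foldl_append]
    simp only [List.foldl_cons, List.foldl_nil]
    set D := l.foldl (pvStep k) PySem.Dict.empty with hD
    refine ⟨?_, by unfold pvStep; split <;> exact pvNodupModify D _ 0 _ ihn⟩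
    intro x
    unfold pvStep
    have hgr : PySem.Int.mod (k - r) k = pvG k r := rfl
    rw [hgr]
    by_cases hself : pvG k r = r
    · -- self-complementary remainder: parity bookkeeping
      rw [hself]
      have hval : ∀ m : List Int, pvPend k m r = ((m.count r % 2 : Nat) : Int) := by
        intro m; unfold pvPend; rw [if_pos hself]
      by_cases hx : x = r
      · subst hx
        split
        · rename_i hpos
          rw [ihp x] at hpos
          rw [PySem.Dict.getD_modify_self, ihp x, hval, hval, pvCountApp, if_pos rfl]
          rw [hval] at hpos
          omega
        · rename_i hpos
          rw [ihp x] at hpos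
          rw [PySem.Dict.getD_modify_self, ihp x, hval, hval, pvCountApp, if_pos rfl]
          rw [hval] at hpos
          omega
      · -- x ≠ r: nothing at x changes
        have hgd : (if D.getD r 0 > 0 then D.modify r 0 (· - 1) else D.modify r 0 (· + 1)).getD x 0
            = D.getD x 0 := by
          split <;> exact PySem.Dict.getD_modify_of_ne D 0 _ hx
        rw [hgd, ihp x]
        unfold pvPend
        by_cases hgx : pvG k x = x
        · rw [if_pos hgx, if_pos hgx, pvCountApp, if_neg hx]
          omega
        · rw [if_neg hgx, if_neg hgx]
          by_cases hgxr : pvG k x = r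
          · -- then x is non-canonical (else x = pvG k r = r), so both counts at x are 0
            have hxnc : PySem.Int.mod x k ≠ x := by
              intro hcan
              exact hx (by rw [← pvGInvol k x hk hcan, hgxr, hself])
            have hc0 : l.count x = 0 := pvCountNonCanon k x l hl' hxnc
            rw [pvCountApp, pvCountApp, if_neg hx, if_pos hgxr, hc0]
            omega
          · rw [pvCountApp, pvCountApp, if_neg hx, if_neg hgxr]
            omega
    · -- proper pair {r, c} with c = pvG k r ≠ r
      set c := pvG k r with hc
      have hcc : pvG k c = r := pvGInvol k r hk hr
      have hcr : c ≠ r := hself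
      have hpendc : ∀ m : List Int, pvPend k m c = max ((m.count c : Int) - (m.count r : Int)) 0 := by
        intro m; unfold pvPend
        rw [if_neg (fun h => hcr ((hcc.symm.trans h).symm)), hcc]
      have hpendr : ∀ m : List Int, pvPend k m r = max ((m.count r : Int) - (m.count c : Int)) 0 := by
        intro m; unfold pvPend
        rw [if_neg (fun h => hcr (hc.trans h)), ← hc]
      split
      · rename_i hpos
        rw [ihp c, hpendc] at hpos
        by_cases hx : x = c
        · subst hx
          rw [PySem.Dict.getD_modify_self, ihp c, hpendc, hpendc,
              pvCountApp, pvCountApp, if_neg hcr, if_pos rfl]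
          omega
        · rw [PySem.Dict.getD_modify_of_ne D 0 _ hx, ihp x]
          by_cases hxr : x = r
          · subst hxr
            rw [hpendr, hpendr, pvCountApp, pvCountApp, if_pos rfl, if_neg hcr]
            omega
          · unfold pvPend
            by_cases hgx : pvG k x = x
            · rw [if_pos hgx, if_pos hgx, pvCountApp, if_neg hxr]
              omega
            · rw [if_neg hgx, if_neg hgx]
              by_cases hgxr : pvG k x = r
              · have hxnc : PySem.Int.mod x k ≠ x := by
                  intro hcan
                  exact hx (by rw [← pvGInvol k x hk hcan, hgxr])
                have hc0 : l.count x = 0 := pvCountNonCanon k x l hl' hxnc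
                rw [pvCountApp, pvCountApp, if_neg hxr, if_pos hgxr, hc0]
                omega
              · rw [pvCountApp, pvCountApp, if_neg hxr, if_neg hgxr]
                omega
      · rename_i hpos
        rw [ihp c, hpendc] at hpos
        have hcle : (l.count c : Int) ≤ (l.count r : Int) := by omega
        by_cases hx : x = r
        · subst hx
          rw [PySem.Dict.getD_modify_self, ihp x, hpendr, hpendr,
              pvCountApp, pvCountApp, if_pos rfl, if_neg hcr]
          omega
        · rw [PySem.Dict.getD_modify_of_ne D 0 _ hx, ihp x]
          by_cases hxc : x = c
          · subst hxc
            rw [hpendc, hpendc, pvCountApp, pvCountApp, if_neg hcr, if_pos rfl]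
            omega
          · unfold pvPend
            by_cases hgx : pvG k x = x
            · rw [if_pos hgx, if_pos hgx, pvCountApp, if_neg hx]
              omega
            · rw [if_neg hgx, if_neg hgx]
              by_cases hgxr : pvG k x = r
              · have hxnc : PySem.Int.mod x k ≠ x := by
                  intro hcan
                  exact hxc (by rw [← pvGInvol k x hk hcan, hgxr])
                have hc0 : l.count x = 0 := pvCountNonCanon k x l hl' hxnc
                rw [pvCountApp, pvCountApp, if_neg hx, if_pos hgxr, hc0]
                omega
              · rw [pvCountApp, pvCountApp, if_neg hx, if_neg hgxr]
                omega

-- boolean shape of one step of A's early-return loop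
theorem pvIfStep (c1 c2 d1 d2 d3 x : Bool) :
    (if c1 then (if d1 then false else x)
     else if c2 then (if d2 then false else x)
     else (if d3 then false else x))
    = ((if c1 then !d1 else if c2 then !d2 else !d3) && x) := by
  cases c1 <;> cases c2 <;> cases d1 <;> cases d2 <;> cases d3 <;> cases x <;> rfl

theorem pvCheckA_eq_all (rc : PySem.Dict Int Int) (k : Int) (l : List Int) :
    pvCheckA rc k l = l.all (fun rem =>
      if rem == 0 then !(PySem.Int.mod (rc.getD rem 0) 2 != 0)
      else if rem * 2 == k then !(PySem.Int.mod (rc.getD rem 0) 2 != 0)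
      else !(rc.getD rem 0 != rc.getD (k - rem) 0)) := by
  induction l with
  | nil => rfl
  | cons rem rest ih =>
    simp only [pvCheckA, List.all_cons, ih]
    exact pvIfStep _ _ _ _ _ _

-- A's counter loop (keyed by num % k) is the counter of the remainder list
theorem pvCounterA_eq (input_list : List Int) (k : Int) :
    input_list.foldl (fun d num => d.modify (PySem.Int.mod num k) 0 (· + 1)) PySem.Dict.empty
      = PySem.Dict.counter (input_list.map (fun num => PySem.Int.mod num k)) := by
  rw [PySem.Dict.counter_eq_foldl, List.foldl_map]

theorem pvSet_all (l : List Int) (p : Int → Bool) :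
    (PySem.Set.ofList l).all p = l.all p := by
  rcases hb : l.all p with _ | _
  · simp only [List.all_eq_false] at hb ⊢
    obtain ⟨x, hx, hpx⟩ := hb
    exact ⟨x, (PySem.Set.mem_ofList _ _).mpr hx, hpx⟩
  · simp only [List.all_eq_true] at hb ⊢
    intro x hx
    exact hb x ((PySem.Set.mem_ofList _ _).mp hx)

-- A's per-remainder condition over the whole list holds iff every pending count of B is zero
theorem pvA_iff (rems : List Int) (k : Int) (hk : k ≠ 0)
    (hcanon : ∀ r ∈ rems, PySem.Int.mod r k = r) :
    (∀ rem ∈ rems, (if rem == 0 then !(PySem.Int.mod ((PySem.Dict.counter rems).getD rem 0) 2 != 0)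
      else if rem * 2 == k then !(PySem.Int.mod ((PySem.Dict.counter rems).getD rem 0) 2 != 0)
      else !((PySem.Dict.counter rems).getD rem 0 != (PySem.Dict.counter rems).getD (k - rem) 0)) = true)
    ↔ (∀ x, pvPend k rems x = 0) := by
  have hcnt : ∀ v, (PySem.Dict.counter rems).getD v 0 = (rems.count v : Int) :=
    fun v => PySem.Dict.getD_counter rems v
  have hmod2 : ∀ n : Nat, (!(PySem.Int.mod (n : Int) 2 != 0)) = true ↔ n % 2 = 0 := by
    intro n
    rw [PySem.Int.mod_eq_emod_of_pos (by norm_num : (0:Int) < 2)]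
    simp [bne]
    omega
  constructor
  · intro hall x
    by_cases hmem : x ∈ rems
    · have hx := hall x hmem
      have hcan := hcanon x hmem
      simp only [hcnt] at hx
      unfold pvPend
      by_cases hgx : pvG k x = x
      · rw [if_pos hgx]
        rcases (pvGSelfIff k x hk hcan).mp hgx with h0 | h2
        · subst h0
          rw [if_pos (by simp)] at hx
          rw [hmod2] at hx
          simp [hx]
        · have hx0 : x ≠ 0 := by
            intro h; subst h; omega
          rw [if_neg (by simpa using hx0), if_pos (by simpa using h2), hmod2] at hx
          simp [hx]
      · rw [if_neg hgx]
        have hx0 : x ≠ 0 := by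
          intro h; subst h
          exact hgx ((pvGSelfIff k 0 hk hcan).mpr (Or.inl rfl))
        have hx2 : x * 2 ≠ k := by
          intro h
          exact hgx ((pvGSelfIff k x hk hcan).mpr (Or.inr h))
        rw [if_neg (by simpa using hx0), if_neg (by simpa using hx2)] at hx
        rw [Bool.not_eq_eq_eq_not, Bool.not_true, bne_eq_false_iff_eq] at hx
        rw [pvGEq k x hk hcan hx0, ← hx]
        omega
    · -- x ∉ rems: count is 0, the pending count vanishes
      have hc0 : rems.count x = 0 := List.count_eq_zero.mpr hmem
      unfold pvPend
      rw [hc0]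
      split
      · simp
      · omega
  · intro hpend r hmem
    have hcan := hcanon r hmem
    have hp := hpend r
    simp only [hcnt]
    by_cases h0 : r = 0
    · subst h0
      have hg : pvG k 0 = 0 := (pvGSelfIff k 0 hk hcan).mpr (Or.inl rfl)
      rw [pvPend, if_pos hg] at hp
      rw [if_pos (by simp), hmod2]
      omega
    · by_cases h2 : r * 2 = k
      · have hg : pvG k r = r := (pvGSelfIff k r hk hcan).mpr (Or.inr h2)
        rw [pvPend, if_pos hg] at hp
        rw [if_neg (by simpa using h0), if_pos (by simpa using h2), hmod2]
        omega
      · have hg : pvG k r ≠ r := by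
          intro h
          rcases (pvGSelfIff k r hk hcan).mp h with h | h
          · exact h0 h
          · exact h2 h
        have hp2 := hpend (pvG k r)
        rw [pvPend, if_neg hg] at hp
        rw [pvPend, if_neg (by rw [pvGInvol k r hk hcan]; exact fun h => hg h.symm),
            pvGInvol k r hk hcan] at hp2
        rw [if_neg (by simpa using h0), if_neg (by simpa using h2),
            Bool.not_eq_eq_eq_not, Bool.not_true, bne_eq_false_iff_eq,
            ← pvGEq k r hk hcan h0]
        omega

-- ===== VERDICT (by name: the statement is the Claim_ definition above) =====
theorem find_divisible_pairs_spec : Claim_equal_find_divisible_pairs := by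
  intro input_list k _ hpre
  unfold Spec_find_divisible_pairs
  rcases hpre with rfl | hk
  · rfl
  · unfold find_divisible_pairs find_divisible_pairs_alt
    simp only [pvCounterA_eq, pvCheckA_eq_all, PySem.Dict.keys_counter, pvSet_all]
    set rems := input_list.map (fun num => PySem.Int.mod num k) with hrems
    have hcanon : ∀ r ∈ rems, PySem.Int.mod r k = r := by
      intro r hrm
      rw [hrems] at hrm
      simp only [List.mem_map] at hrm
      obtain ⟨num, _, rfl⟩ := hrm
      exact pvModMod k num hk
    have hfold : input_list.foldl (fun d num =>
        if d.getD (PySem.Int.mod (k - PySem.Int.mod num k) k) 0 > 0 then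
          d.modify (PySem.Int.mod (k - PySem.Int.mod num k) k) 0 (· - 1)
        else d.modify (PySem.Int.mod num k) 0 (· + 1))
        (PySem.Dict.empty : PySem.Dict Int Int) = rems.foldl (pvStep k) PySem.Dict.empty := by
      rw [hrems, List.foldl_map]
      rfl
    simp only [hfold]
    obtain ⟨hinv, hnodup⟩ := pvInv k hk rems hcanon
    set D := rems.foldl (pvStep k) PySem.Dict.empty with hDdef
    rw [PySem.Dict.values_eq_map_keys D hnodup 0, Bool.eq_iff_iff, List.all_eq_true,
       List.all_eq_true, pvA_iff rems k hk hcanon]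
    constructor
    · intro hpend x hxk
      simp only [List.mem_map] at hxk
      obtain ⟨y, hyk, rfl⟩ := hxk
      rw [hinv y, hpend y]
      rfl
    · intro hall x
      by_cases hmem : x ∈ D.keys
      · have hx := hall (D.getD x 0) (List.mem_map_of_mem hmem)
        simp only [beq_iff_eq] at hx
        rw [← hinv x]
        exact hx
      · rw [← hinv x, PySem.Dict.getD_of_not_contains D 0 (by
          rcases hco : D.contains x with _ | _
          · rfl
          · exact absurd ((PySem.Dict.contains_iff_mem_keys D x).mp hco) hmem)]
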